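-- pv_equiv track=rewrite | github.com/Z1hanW/CRISP-Real2Sim | vis_scripts/viser_m/utils.py | build_global_segments_greedy
-- ===== SOURCE A (Python) =====
-- from typing import Dict, List, Tuple, Any
-- from typing import Dict, List, Tuple, Optional, Set
-- from collections import defaultdict
-- from typing import Dict, List, Tuple, Optional
-- from typing import Tuple
-- from typing import Dict, List, Tuple, Optional
-- from typing import Dict, List
-- from typing import Dict, List, Tuple
-- from typing import Dict, List, Tuple, Optional, Set
-- from collections import defaultdict
-- from typing import Dict, List, Optional, Any
-- from typing import Dict, List, Tuple, Optional
-- from typing import Tuple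
-- from typing import Dict, List, Tuple, Optional
-- from typing import Dict, List
-- from typing import Dict, List, Tuple, Optional
-- from typing import Tuple, Optional
--
-- def build_global_segments_greedy(
--     all_frame_segments: List[Dict[int, Dict]],
--     correspondence_pairs: List[Tuple[int, int, int, int]]
-- ) -> Dict[int, List[Tuple[int, int]]]:
--     """
--     Union-find over *all* correspondence pairs (frame_i, seg_i, frame_j, seg_j).
--     Returns {global_id: [(frame_idx, local_seg_id), …]}.
--     """
--     parent = {}
--     def key(fi, sid): return f"{fi}_{sid}"
--     def find(x):
--         parent.setdefault(x, x)
--         if parent[x] != x: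
--             parent[x] = find(parent[x])
--         return parent[x]
--     def union(a, b):
--         pa, pb = find(a), find(b)
--         if pa != pb:
--             parent[pa] = pb
--
--     # initialise every local segment
--     for fi, segs in enumerate(all_frame_segments):
--         for sid in segs:
--             find(key(fi, sid))
--
--     # greedy unions
--     for fi, sid_i, fj, sid_j in correspondence_pairs:
--         union(key(fi, sid_i), key(fj, sid_j))
--
--     # collect & renumber
--     groups = defaultdict(list)
--     for fi, segs in enumerate(all_frame_segments):
--         for sid in segs:
--             groups[find(key(fi, sid))].append((fi, sid))
--
--     return {gid: members for gid, members in enumerate(groups.values())}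
-- ===== SOURCE B (Python) =====
-- def build_global_segments_greedy(all_frame_segments, correspondence_pairs):
--     """Quick-find clustering: one flat label dict per node, merged by relabelling."""
--     def key(fi, sid):
--         return f"{fi}_{sid}"
--
--     # every local segment starts as its own representative
--     label = {}
--     for fi, segs in enumerate(all_frame_segments):
--         for sid in segs:
--             label.setdefault(key(fi, sid), key(fi, sid))
--
--     # merge: rewrite every occurrence of a's representative to b's
--     for fi, sid_i, fj, sid_j in correspondence_pairs:
--         a, b = key(fi, sid_i), key(fj, sid_j)
--         ra = label.setdefault(a, a)
--         rb = label.setdefault(b, b)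
--         if ra != rb:
--             label = {x: (rb if r == ra else r) for x, r in label.items()}
--
--     # collect & renumber
--     groups = {}
--     for fi, segs in enumerate(all_frame_segments):
--         for sid in segs:
--             groups.setdefault(label[key(fi, sid)], []).append((fi, sid))
--
--     return {gid: members for gid, members in enumerate(groups.values())}
-- ===== Notes on version B (the rewrite author's own statement) =====
-- stated objective: alternative
-- what changed: A's recursive path-compressing union-find (parent forest, recursive find with memoizing compression) is replaced by a flat quick-find label map: every node carries its representative directly, and a merge rewrites all occurrences of one representative in a single dict comprehension, so there is no recursion and no tree structure.
import Mathlib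
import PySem

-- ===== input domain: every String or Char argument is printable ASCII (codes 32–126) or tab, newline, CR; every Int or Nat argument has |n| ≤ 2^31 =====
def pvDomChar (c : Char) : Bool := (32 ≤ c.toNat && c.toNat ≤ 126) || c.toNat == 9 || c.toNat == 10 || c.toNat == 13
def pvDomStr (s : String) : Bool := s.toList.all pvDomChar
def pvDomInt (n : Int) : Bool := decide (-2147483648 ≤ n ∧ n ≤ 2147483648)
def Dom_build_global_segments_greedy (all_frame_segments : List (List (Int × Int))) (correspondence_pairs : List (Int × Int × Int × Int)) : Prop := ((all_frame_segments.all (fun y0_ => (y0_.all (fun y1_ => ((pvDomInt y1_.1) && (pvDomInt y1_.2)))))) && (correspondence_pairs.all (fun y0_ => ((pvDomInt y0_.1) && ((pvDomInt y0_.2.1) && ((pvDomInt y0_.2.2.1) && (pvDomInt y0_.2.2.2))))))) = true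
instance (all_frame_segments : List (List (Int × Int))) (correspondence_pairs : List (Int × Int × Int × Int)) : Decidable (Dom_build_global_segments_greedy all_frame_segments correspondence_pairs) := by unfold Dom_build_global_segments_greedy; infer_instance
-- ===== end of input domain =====

-- B replaces A's recursive path-compressing union-find by a flat "quick-find" label map
-- merged by relabelling; same return value, no recursion (objective: alternative/simpler).

-- ===== PORT A =====
-- key(fi, sid) = f"{fi}_{sid}"  (shared by both ports; both Pythons define the same helper)
def pvKey (fi sid : Int) : String := PySem.Int.toStr fi ++ "_" ++ PySem.Int.toStr sid

-- find(x) with parent.setdefault and path compression; the fuel argument only makes the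
-- recursion structural — pvFindTop supplies fuel (size+1) that is proved sufficient below,
-- so the 0-fuel branch is never taken on the inputs the claim covers.
def pvFind (fuel : Nat) (p : PySem.Dict String String) (x : String) :
    PySem.Dict String String × String :=
  let pd := p.setdefault x x
  match fuel with
  | 0 => (pd, x)
  | fuel + 1 =>
    let px := pd.getD x x
    if px == x then (pd, x)
    else
      let res := pvFind fuel pd px
      (res.1.insert x res.2, res.2)

def pvFindTop (p : PySem.Dict String String) (x : String) :
    PySem.Dict String String × String :=
  pvFind (p.size + 1) p x

-- union(a, b): pa, pb = find(a), find(b); if pa != pb: parent[pa] = pb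
def pvUnion (p : PySem.Dict String String) (a b : String) : PySem.Dict String String :=
  let fa := pvFindTop p a
  let fb := pvFindTop fa.1 b
  if fa.2 == fb.2 then fb.1 else fb.1.insert fa.2 fb.2

-- 'for sid in segs' iterates the keys of the dict segs = Dict.ofList segs
def build_global_segments_greedy (all_frame_segments : List (List (Int × Int))) (correspondence_pairs : List (Int × Int × Int × Int)) : List (Int × List (Int × Int)) :=
  -- initialise every local segment
  let p0 := (PySem.List.enumerate all_frame_segments).foldl
    (fun p fs => ((PySem.Dict.ofList fs.2 : PySem.Dict Int Int).keys).foldl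
      (fun p sid => (pvFindTop p (pvKey fs.1 sid)).1) p)
    PySem.Dict.empty
  -- greedy unions
  let p1 := correspondence_pairs.foldl
    (fun p q => pvUnion p (pvKey q.1 q.2.1) (pvKey q.2.2.1 q.2.2.2)) p0
  -- collect & renumber (groups is a defaultdict(list): groups[find(key)].append((fi, sid)))
  let st := (PySem.List.enumerate all_frame_segments).foldl
    (fun st fs => ((PySem.Dict.ofList fs.2 : PySem.Dict Int Int).keys).foldl
      (fun (st : PySem.Dict String String × PySem.Dict String (List (Int × Int))) sid =>
        let fr := pvFindTop st.1 (pvKey fs.1 sid)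
        (fr.1, st.2.modify fr.2 [] (fun ms => ms ++ [(fs.1, sid)]))) st)
    ((p1, (PySem.Dict.empty : PySem.Dict String (List (Int × Int)))))
  PySem.List.enumerate st.2.values

-- ===== PORT B =====
-- label = {x: (rb if r == ra else r) for x, r in label.items()}
def pvRelabel (l : PySem.Dict String String) (ra rb : String) : PySem.Dict String String :=
  PySem.Dict.ofList (l.items.map (fun kv => (kv.1, if kv.2 == ra then rb else kv.2)))

-- one correspondence pair: ra = label.setdefault(a, a); rb = label.setdefault(b, b);
-- if ra != rb: relabel every ra to rb
def pvMergeStep (l : PySem.Dict String String) (a b : String) : PySem.Dict String String :=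
  let l1 := l.setdefault a a
  let ra := l1.getD a a
  let l2 := l1.setdefault b b
  let rb := l2.getD b b
  if ra == rb then l2 else pvRelabel l2 ra rb

def build_global_segments_greedy_alt (all_frame_segments : List (List (Int × Int))) (correspondence_pairs : List (Int × Int × Int × Int)) : List (Int × List (Int × Int)) :=
  -- every local segment starts as its own representative
  let l0 := (PySem.List.enumerate all_frame_segments).foldl
    (fun l fs => ((PySem.Dict.ofList fs.2 : PySem.Dict Int Int).keys).foldl
      (fun l sid => l.setdefault (pvKey fs.1 sid) (pvKey fs.1 sid)) l)
    PySem.Dict.empty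
  -- merge: rewrite every occurrence of a's representative to b's
  let l1 := correspondence_pairs.foldl
    (fun l q => pvMergeStep l (pvKey q.1 q.2.1) (pvKey q.2.2.1 q.2.2.2)) l0
  -- collect & renumber; label[key] is ported as getD key key — the key was inserted in the
  -- first loop and merge steps never drop keys, so the default is never consulted (no KeyError)
  let groups := (PySem.List.enumerate all_frame_segments).foldl
    (fun g fs => ((PySem.Dict.ofList fs.2 : PySem.Dict Int Int).keys).foldl
      (fun (g : PySem.Dict String (List (Int × Int))) sid =>
        g.modify (l1.getD (pvKey fs.1 sid) (pvKey fs.1 sid)) [] (fun ms => ms ++ [(fs.1, sid)])) g)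
    PySem.Dict.empty
  PySem.List.enumerate groups.values

-- ===== PRECONDITION & SPEC =====
def Spec_build_global_segments_greedy (all_frame_segments : List (List (Int × Int))) (correspondence_pairs : List (Int × Int × Int × Int)) (out : List (Int × List (Int × Int))) : Prop := out = build_global_segments_greedy_alt all_frame_segments correspondence_pairs
instance (all_frame_segments : List (List (Int × Int))) (correspondence_pairs : List (Int × Int × Int × Int)) (out : List (Int × List (Int × Int))) : Decidable (Spec_build_global_segments_greedy all_frame_segments correspondence_pairs out) := by unfold Spec_build_global_segments_greedy; infer_instance

-- ===== CLAIM (what is proved, stated in full; the proofs are below) =====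
def Claim_equal_build_global_segments_greedy : Prop := ∀ (all_frame_segments : List (List (Int × Int))) (correspondence_pairs : List (Int × Int × Int × Int)), Dom_build_global_segments_greedy all_frame_segments correspondence_pairs → Spec_build_global_segments_greedy all_frame_segments correspondence_pairs (build_global_segments_greedy all_frame_segments correspondence_pairs)

-- ===== LEMMAS AND PROOFS =====

-- the step function of the parent forest: where x points (itself when absent)
def pvSt (p : PySem.Dict String String) : String → String := fun x => p.getD x x
def pvIsRoot (p : PySem.Dict String String) (x : String) : Prop := pvSt p x = x
-- r is the root of x's parent chain
def pvRoot (p : PySem.Dict String String) (x r : String) : Prop :=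
  ∃ m : Nat, (pvSt p)^[m] x = r ∧ pvIsRoot p r
-- every stored parent is itself a key
def pvClosed (p : PySem.Dict String String) : Prop := ∀ k ∈ p.keys, pvSt p k ∈ p.keys
-- the simulation invariant: A's forest p and B's label map l name the same representatives
def pvInv (p l : PySem.Dict String String) : Prop :=
  pvClosed p ∧ pvClosed l ∧ l.keys.Nodup ∧ ∀ x, pvRoot p x (l.getD x x)

theorem pv_iterate_root {p : PySem.Dict String String} {r : String} (h : pvIsRoot p r)
    (m : Nat) : (pvSt p)^[m] r = r := Function.iterate_fixed h m

theorem pvRoot_unique {p : PySem.Dict String String} {x r r' : String}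
    (h : pvRoot p x r) (h' : pvRoot p x r') : r = r' := by
  obtain ⟨m, hm, hr2⟩ := h
  obtain ⟨m', hm', hr2'⟩ := h'
  rcases le_total m m' with hle | hle
  · have hstep : (pvSt p)^[m'] x = (pvSt p)^[m' - m] ((pvSt p)^[m] x) := by
      rw [← Function.iterate_add_apply]; congr 1; omega
    rw [hm, pv_iterate_root hr2] at hstep
    rw [← hm', hstep]
  · have hstep : (pvSt p)^[m] x = (pvSt p)^[m - m'] ((pvSt p)^[m'] x) := by
      rw [← Function.iterate_add_apply]; congr 1; omega
    rw [hm', pv_iterate_root hr2'] at hstep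
    rw [← hm, hstep]

theorem pvSt_setdefault (p : PySem.Dict String String) (x : String) :
    pvSt (p.setdefault x x) = pvSt p := by
  funext y
  by_cases hc : p.contains x = true
  · rw [PySem.Dict.setdefault_of_contains _ _ hc]
  · simp only [Bool.not_eq_true] at hc
    rw [PySem.Dict.setdefault_of_not_contains _ _ hc]
    unfold pvSt
    rw [PySem.Dict.getD_insert]
    split_ifs with hxy
    · subst hxy; rw [PySem.Dict.getD_of_not_contains _ _ hc]
    · rfl

theorem pvRoot_setdefault {p : PySem.Dict String String} (x : String) {y r : String} :
    pvRoot (p.setdefault x x) y r ↔ pvRoot p y r := by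
  simp [pvRoot, pvIsRoot, pvSt_setdefault]

theorem pvSt_not_mem {p : PySem.Dict String String} {x : String} (h : x ∉ p.keys) :
    pvSt p x = x := by
  unfold pvSt
  apply PySem.Dict.getD_of_not_contains
  rw [PySem.Dict.contains_eq_decide_mem_keys]
  simp [h]

theorem pvClosed_setdefault {p : PySem.Dict String String} (h : pvClosed p) (x : String) :
    pvClosed (p.setdefault x x) := by
  intro k hk
  rw [pvSt_setdefault] at *
  rw [PySem.Dict.keys_setdefault] at hk ⊢
  split_ifs at hk ⊢ with hc
  · exact h k hk
  · rcases List.mem_append.mp hk with hk | hk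
    · exact List.mem_append.mpr (Or.inl (h k hk))
    · have hkx : k = x := by simpa using hk
      subst hkx
      have hnm : k ∉ p.keys := by
        rw [PySem.Dict.contains_eq_decide_mem_keys] at hc; simpa using hc
      rw [pvSt_not_mem hnm]
      exact List.mem_append.mpr (Or.inr hk)

theorem pv_nodup_keys_setdefault {p : PySem.Dict String String} (h : p.keys.Nodup)
    (x v : String) : (p.setdefault x v).keys.Nodup := by
  rw [PySem.Dict.keys_setdefault]
  split_ifs with hc
  · exact h
  · have hnm : x ∉ p.keys := by
      rw [PySem.Dict.contains_eq_decide_mem_keys] at hc; simpa using hc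
    simp only [List.nodup_append, List.nodup_singleton, true_and]
    refine ⟨h, ?_⟩
    intro a ha b hb
    rw [List.mem_singleton] at hb
    subst hb
    intro hab
    subst hab
    exact hnm ha

theorem pv_iterate_mem {p : PySem.Dict String String} (hC : pvClosed p) {x : String}
    (hx : x ∈ p.keys) (m : Nat) : (pvSt p)^[m] x ∈ p.keys := by
  induction m generalizing x with
  | zero => simpa using hx
  | succ m ih =>
    rw [Function.iterate_succ_apply]
    exact ih (hC x hx)

theorem pvRoot_mem_keys {p : PySem.Dict String String} (hC : pvClosed p) {x r : String}
    (h : pvRoot p x r) (hx : x ∈ p.keys) : r ∈ p.keys := by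
  obtain ⟨m, hm, _⟩ := h
  rw [← hm]
  exact pv_iterate_mem hC hx m

-- the chain from x reaches its root within keys-many steps (chains visit distinct keys)
theorem pvRoot_bound {p : PySem.Dict String String} (hC : pvClosed p) {x r : String}
    (h : pvRoot p x r) :
    ∃ m : Nat, (pvSt p)^[m] x = r ∧ pvIsRoot p r ∧ (m = 0 ∨ m < p.keys.length) := by
  classical
  obtain ⟨m₁, hm₁, hr⟩ := h
  have hex : ∃ m : Nat, pvIsRoot p ((pvSt p)^[m] x) := ⟨m₁, by rw [hm₁]; exact hr⟩
  have hroot₀ : pvIsRoot p ((pvSt p)^[Nat.find hex] x) := Nat.find_spec hex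
  set m₀ := Nat.find hex with hm₀def
  have hrval : (pvSt p)^[m₀] x = r :=
    pvRoot_unique ⟨m₀, rfl, hroot₀⟩ ⟨m₁, hm₁, hr⟩
  refine ⟨m₀, hrval, hr, ?_⟩
  by_cases h0 : m₀ = 0
  · exact Or.inl h0
  right
  have hxk : x ∈ p.keys := by
    by_contra hxk
    have h00 : pvIsRoot p ((pvSt p)^[0] x) := by
      simpa [pvIsRoot] using pvSt_not_mem hxk
    exact h0 (Nat.le_zero.mp (Nat.find_le h00))
  have hinj : ∀ i j : Nat, i < j → j ≤ m₀ → (pvSt p)^[i] x ≠ (pvSt p)^[j] x := by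
    intro i j hij hj heq
    have hkey : (pvSt p)^[m₀] x = (pvSt p)^[m₀ - (j - i)] x := by
      have h1 : (pvSt p)^[m₀] x = (pvSt p)^[m₀ - j] ((pvSt p)^[j] x) := by
        rw [← Function.iterate_add_apply]; congr 1; omega
      rw [h1, ← heq, ← Function.iterate_add_apply]
      congr 1; omega
    have hsm : pvIsRoot p ((pvSt p)^[m₀ - (j - i)] x) := hkey ▸ hroot₀
    have hlt : m₀ - (j - i) < m₀ := by omega
    exact Nat.find_min hex hlt hsm
  have hnd : ((List.range (m₀ + 1)).map (fun i => (pvSt p)^[i] x)).Nodup := by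
    refine List.Nodup.map_on ?_ List.nodup_range
    intro i hi j hj hij
    by_contra hne
    have hi' : i ≤ m₀ := Nat.lt_succ_iff.mp (List.mem_range.mp hi)
    have hj' : j ≤ m₀ := Nat.lt_succ_iff.mp (List.mem_range.mp hj)
    rcases lt_trichotomy i j with hlt | heq | hlt
    · exact hinj i j hlt hj' hij
    · exact hne heq
    · exact hinj j i hlt hi' hij.symm
  have hsub : ((List.range (m₀ + 1)).map (fun i => (pvSt p)^[i] x)) ⊆ p.keys := by
    intro y hy
    rcases List.mem_map.mp hy with ⟨i, _, rfl⟩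
    exact pv_iterate_mem hC hxk i
  have hlen := (List.subperm_of_subset hnd hsub).length_le
  simp only [List.length_map, List.length_range] at hlen
  omega

-- path-compression insert (x's root is r) preserves every root
theorem pvRoot_insert_compress {p : PySem.Dict String String} {x r : String}
    (hr : pvIsRoot p r) (hx : pvRoot p x r) :
    ∀ y r₀, pvRoot p y r₀ → pvRoot (p.insert x r) y r₀ := by
  have hstne : ∀ y : String, y ≠ x → pvSt (p.insert x r) y = pvSt p y := by
    intro y hy
    unfold pvSt
    rw [PySem.Dict.getD_insert]
    simp [hy]
  have hstx : pvSt (p.insert x r) x = r := by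
    unfold pvSt
    rw [PySem.Dict.getD_insert]
    simp
  by_cases hxr : pvIsRoot p x
  · have hrx : r = x := pvRoot_unique hx ⟨0, rfl, hxr⟩
    have hsame : pvSt (p.insert x r) = pvSt p := by
      funext y
      by_cases hy : y = x
      · subst hy; rw [hstx, hrx]; exact hxr.symm
      · exact hstne y hy
    intro y r₀ hY
    simpa [pvRoot, pvIsRoot, hsame] using hY
  · have hrne : r ≠ x := fun he => hxr (he ▸ hr)
    have hIr' : pvIsRoot (p.insert x r) r := by
      unfold pvIsRoot
      rw [hstne r hrne]
      exact hr
    intro y r₀ hY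
    obtain ⟨m, hm, hr₀⟩ := hY
    have main : ∀ (m : Nat) (y : String), (pvSt p)^[m] y = r₀ → pvRoot (p.insert x r) y r₀ := by
      intro m
      induction m with
      | zero =>
        intro y hm0
        simp only [Function.iterate_zero, id] at hm0
        subst hm0
        have hyne : y ≠ x := fun he => hxr (he ▸ hr₀)
        exact ⟨0, rfl, by unfold pvIsRoot; rw [hstne y hyne]; exact hr₀⟩
      | succ m ih =>
        intro y hm1
        by_cases hy : pvIsRoot p y
        · have hyr : y = r₀ := by rw [← hm1, pv_iterate_root hy]
          subst hyr
          have hyne : y ≠ x := fun he => hxr (he ▸ hy)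
          exact ⟨0, rfl, by unfold pvIsRoot; rw [hstne y hyne]; exact hy⟩
        · by_cases hyx : y = x
          · subst hyx
            have hr0r : r₀ = r := pvRoot_unique ⟨m + 1, hm1, hr₀⟩ hx
            subst hr0r
            exact ⟨1, by simpa using hstx, hIr'⟩
          · have hm' : (pvSt p)^[m] (pvSt p y) = r₀ := by
              rw [← Function.iterate_succ_apply]; exact hm1
            obtain ⟨m', hm'', hr''⟩ := ih (pvSt p y) hm'
            refine ⟨m' + 1, ?_, hr''⟩
            rw [Function.iterate_succ_apply, hstne y hyx, hm'']
    exact main m y hm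

-- union insert (parent[ra] = rb for distinct roots) redirects exactly the ra-tree
theorem pvRoot_insert_union {p : PySem.Dict String String} {ra rb : String}
    (hra : pvIsRoot p ra) (hrb : pvIsRoot p rb) (hne : ra ≠ rb) :
    ∀ y r₀, pvRoot p y r₀ → pvRoot (p.insert ra rb) y (if r₀ = ra then rb else r₀) := by
  have hstne : ∀ y : String, y ≠ ra → pvSt (p.insert ra rb) y = pvSt p y := by
    intro y hy
    unfold pvSt
    rw [PySem.Dict.getD_insert]
    simp [hy]
  have hstra : pvSt (p.insert ra rb) ra = rb := by
    unfold pvSt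
    rw [PySem.Dict.getD_insert]
    simp
  have hrbne : rb ≠ ra := fun he => hne he.symm
  have hrb' : pvIsRoot (p.insert ra rb) rb := by
    unfold pvIsRoot
    rw [hstne rb hrbne]
    exact hrb
  intro y r₀ hY
  obtain ⟨m, hm, hr₀⟩ := hY
  have main : ∀ (m : Nat) (y : String), (pvSt p)^[m] y = r₀ →
      pvRoot (p.insert ra rb) y (if r₀ = ra then rb else r₀) := by
    intro m
    induction m with
    | zero =>
      intro y hm0
      simp only [Function.iterate_zero, id] at hm0
      subst hm0
      by_cases hya : y = ra
      · subst hya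
        rw [if_pos rfl]
        exact ⟨1, by simpa using hstra, hrb'⟩
      · rw [if_neg hya]
        exact ⟨0, rfl, by unfold pvIsRoot; rw [hstne y hya]; exact hr₀⟩
    | succ m ih =>
      intro y hm1
      by_cases hy : pvIsRoot p y
      · have hyr : y = r₀ := by rw [← hm1, pv_iterate_root hy]
        subst hyr
        by_cases hya : y = ra
        · subst hya
          rw [if_pos rfl]
          exact ⟨1, by simpa using hstra, hrb'⟩
        · rw [if_neg hya]
          exact ⟨0, rfl, by unfold pvIsRoot; rw [hstne y hya]; exact hy⟩
      · have hya : y ≠ ra := fun he => hy (he ▸ hra)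
        have hm' : (pvSt p)^[m] (pvSt p y) = r₀ := by
          rw [← Function.iterate_succ_apply]; exact hm1
        obtain ⟨m', hm'', hr''⟩ := ih (pvSt p y) hm'
        refine ⟨m' + 1, ?_, hr''⟩
        rw [Function.iterate_succ_apply, hstne y hya, hm'']
  exact main m y hm

theorem pvFind_spec : ∀ (fuel : Nat) (p : PySem.Dict String String) (x : String),
    pvClosed p → (∃ m : Nat, m < fuel ∧ pvIsRoot p ((pvSt p)^[m] x)) →
    pvClosed (pvFind fuel p x).1 ∧
    (pvFind fuel p x).1.keys = (p.setdefault x x).keys ∧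
    pvRoot p x (pvFind fuel p x).2 ∧
    (∀ y r₀, pvRoot p y r₀ → pvRoot (pvFind fuel p x).1 y r₀) := by
  intro fuel
  induction fuel with
  | zero =>
    intro p x hC hm
    obtain ⟨m, hm0, _⟩ := hm
    omega
  | succ fuel ih =>
    intro p x hC hm
    have hstpd : pvSt (p.setdefault x x) = pvSt p := pvSt_setdefault p x
    have hCpd : pvClosed (p.setdefault x x) := pvClosed_setdefault hC x
    have hxpd : x ∈ (p.setdefault x x).keys := by
      rw [PySem.Dict.keys_setdefault]
      split_ifs with hc
      · rw [PySem.Dict.contains_eq_decide_mem_keys] at hc; simpa using hc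
      · simp
    by_cases hroot : (p.setdefault x x).getD x x = x
    · have hgoal_eq : pvFind (fuel + 1) p x = (p.setdefault x x, x) := by
        simp only [pvFind]
        rw [if_pos (beq_iff_eq.mpr hroot)]
      rw [hgoal_eq]
      have hrootp : pvIsRoot p x := by
        unfold pvIsRoot
        rw [← congrFun hstpd x]
        exact hroot
      refine ⟨hCpd, rfl, ⟨0, rfl, hrootp⟩, ?_⟩
      intro y r₀ hY
      exact (pvRoot_setdefault x).mpr hY
    · set px := (p.setdefault x x).getD x x with hpx
      have hpxst : pvSt p x = px := by rw [← congrFun hstpd x]; rfl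
      have hxnroot : ¬ pvIsRoot p x := by unfold pvIsRoot; rw [hpxst]; exact hroot
      obtain ⟨m, hmf, hmr⟩ := hm
      have hmpos : m ≠ 0 := by
        intro h0
        subst h0
        simp only [Function.iterate_zero, id] at hmr
        exact hxnroot hmr
      obtain ⟨m', rfl⟩ : ∃ m', m = m' + 1 := ⟨m - 1, by omega⟩
      have hm' : pvIsRoot p ((pvSt p)^[m'] px) := by
        rw [← hpxst, ← Function.iterate_succ_apply]
        exact hmr
      have hmrec : ∃ mm : Nat, mm < fuel ∧
          pvIsRoot (p.setdefault x x) ((pvSt (p.setdefault x x))^[mm] px) := by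
        refine ⟨m', by omega, ?_⟩
        unfold pvIsRoot
        rw [hstpd]
        exact hm'
      obtain ⟨C', K', R', P'⟩ := ih (p.setdefault x x) px hCpd hmrec
      have hpxmem : px ∈ (p.setdefault x x).keys := hCpd x hxpd
      have hKeq : (pvFind fuel (p.setdefault x x) px).1.keys = (p.setdefault x x).keys := by
        rw [K', PySem.Dict.setdefault_of_contains]
        rw [PySem.Dict.contains_eq_decide_mem_keys]
        simp [hpxmem]
      have Rp : pvRoot p px (pvFind fuel (p.setdefault x x) px).2 := (pvRoot_setdefault x).mp R'
      have Rx : pvRoot p x (pvFind fuel (p.setdefault x x) px).2 := by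
        obtain ⟨mr, hmr2, hrr⟩ := Rp
        exact ⟨mr + 1, by rw [Function.iterate_succ_apply, hpxst, hmr2], hrr⟩
      have hgoal_eq : pvFind (fuel + 1) p x =
          ((pvFind fuel (p.setdefault x x) px).1.insert x (pvFind fuel (p.setdefault x x) px).2,
           (pvFind fuel (p.setdefault x x) px).2) := by
        simp only [pvFind]
        rw [if_neg (by simp only [beq_iff_eq]; rw [← hpx]; exact hroot)]
      rw [hgoal_eq]
      set res := pvFind fuel (p.setdefault x x) px with hres
      have hRres_x : pvRoot res.1 x res.2 := P' x res.2 ((pvRoot_setdefault x).mpr Rx)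
      have hIsRootres : pvIsRoot res.1 res.2 := by
        obtain ⟨_, _, hrt⟩ := R'
        obtain ⟨_, _, hrt'⟩ := P' res.2 res.2 ⟨0, rfl, hrt⟩
        exact hrt'
      have hcontx : res.1.contains x = true := by
        rw [PySem.Dict.contains_eq_decide_mem_keys, hKeq]
        simp [hxpd]
      have hkeysins : (res.1.insert x res.2).keys = res.1.keys :=
        PySem.Dict.keys_insert_of_contains _ _ hcontx
      have hstins : ∀ y : String, y ≠ x → pvSt (res.1.insert x res.2) y = pvSt res.1 y := by
        intro y hy
        unfold pvSt
        rw [PySem.Dict.getD_insert]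
        simp [hy]
      have hres2mem : res.2 ∈ res.1.keys :=
        pvRoot_mem_keys C' hRres_x (hKeq ▸ hxpd)
      refine ⟨?_, ?_, Rx, ?_⟩
      · intro k hk
        rw [hkeysins] at hk ⊢
        by_cases hkx : k = x
        · subst hkx
          have : pvSt (res.1.insert k res.2) k = res.2 := by
            unfold pvSt
            rw [PySem.Dict.getD_insert]
            simp
          rw [this]
          exact hres2mem
        · rw [hstins k hkx]
          exact C' k hk
      · rw [hkeysins, hKeq]
      · intro y r₀ hY
        exact pvRoot_insert_compress hIsRootres hRres_x y r₀ (P' y r₀ ((pvRoot_setdefault x).mpr hY))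

theorem pvFindTop_spec (p : PySem.Dict String String) (x : String)
    (hC : pvClosed p) (hx : ∃ r, pvRoot p x r) :
    pvClosed (pvFindTop p x).1 ∧
    (pvFindTop p x).1.keys = (p.setdefault x x).keys ∧
    pvRoot p x (pvFindTop p x).2 ∧
    (∀ y r₀, pvRoot p y r₀ → pvRoot (pvFindTop p x).1 y r₀) := by
  obtain ⟨r, hr⟩ := hx
  obtain ⟨m, hm, hroot, hcase⟩ := pvRoot_bound hC hr
  have hklen : p.keys.length = p.size := by
    simp [PySem.Dict.keys, PySem.Dict.size]
  exact pvFind_spec (p.size + 1) p x hC ⟨m, by omega, by rw [hm]; exact hroot⟩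

theorem pv_items_relabel {l : PySem.Dict String String} (h : l.keys.Nodup) (ra rb : String) :
    (pvRelabel l ra rb).items = l.items.map (fun kv => (kv.1, if kv.2 == ra then rb else kv.2)) := by
  have hfresh : ∀ a ∈ l.items.map (fun kv => (kv.1, if kv.2 == ra then rb else kv.2)),
      (PySem.Dict.empty : PySem.Dict String String).contains a.1 = false := by
    intro a _
    exact PySem.Dict.contains_empty _
  have hnd : ((l.items.map (fun kv => (kv.1, if kv.2 == ra then rb else kv.2))).map
      (fun a => a.1)).Nodup := by
    rw [List.map_map]
    simpa [Function.comp, PySem.Dict.keys] using h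
  have hmain := PySem.Dict.items_foldl_insert_fresh
    (l.items.map (fun kv => (kv.1, if kv.2 == ra then rb else kv.2)))
    (fun a => a.1) (fun a => a.2) PySem.Dict.empty hfresh hnd
  unfold pvRelabel PySem.Dict.ofList PySem.Dict.update
  simpa using hmain

theorem pv_keys_relabel {l : PySem.Dict String String} (h : l.keys.Nodup) (ra rb : String) :
    (pvRelabel l ra rb).keys = l.keys := by
  unfold PySem.Dict.keys
  rw [pv_items_relabel h]
  simp [List.map_map, Function.comp]

theorem pv_getD_relabel {l : PySem.Dict String String} (h : l.keys.Nodup) (ra rb x : String) :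
    (pvRelabel l ra rb).getD x x =
      if x ∈ l.keys then (if l.getD x x = ra then rb else l.getD x x) else x := by
  by_cases hx : x ∈ l.keys
  · have hcont : l.contains x = true := by
      rw [PySem.Dict.contains_eq_decide_mem_keys]; simp [hx]
    obtain ⟨v, hv⟩ : ∃ v, l.get? x = some v := by
      have hs := PySem.Dict.contains_eq_isSome_get? (d := l) (k := x)
      rw [hcont] at hs
      exact Option.isSome_iff_exists.mp hs.symm
    have hvm : (x, v) ∈ l.items := (PySem.Dict.get?_eq_some_iff_mem_items l x v h).mp hv
    have hgd : l.getD x x = v := PySem.Dict.getD_of_mem_items l hvm h x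
    have hnd' : (pvRelabel l ra rb).keys.Nodup := by rw [pv_keys_relabel h]; exact h
    have hm' : (x, if v == ra then rb else v) ∈ (pvRelabel l ra rb).items := by
      rw [pv_items_relabel h]
      exact List.mem_map.mpr ⟨(x, v), hvm, rfl⟩
    rw [PySem.Dict.getD_of_mem_items _ hm' hnd', hgd, if_pos hx]
    simp [beq_iff_eq]
  · have hcont : (pvRelabel l ra rb).contains x = false := by
      rw [PySem.Dict.contains_eq_decide_mem_keys, pv_keys_relabel h]
      simp [hx]
    rw [PySem.Dict.getD_of_not_contains _ _ hcont, if_neg hx]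

theorem pv_getD_setdefault_self_self (l : PySem.Dict String String) (k x : String) :
    (l.setdefault k k).getD x x = l.getD x x := by
  by_cases hx : x = k
  · subst hx; rw [PySem.Dict.getD_setdefault_self]
  · rw [PySem.Dict.getD_eq_get?_getD, PySem.Dict.get?_setdefault_of_ne _ _ hx,
      ← PySem.Dict.getD_eq_get?_getD]

theorem pvInv_init {p l : PySem.Dict String String} (h : pvInv p l) (c : String) :
    pvInv (pvFindTop p c).1 (l.setdefault c c) := by
  obtain ⟨hCp, hCl, hnd, hR⟩ := h
  obtain ⟨C', K', R', P'⟩ := pvFindTop_spec p c hCp ⟨_, hR c⟩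
  refine ⟨C', pvClosed_setdefault hCl c, pv_nodup_keys_setdefault hnd c c, ?_⟩
  intro x
  rw [pv_getD_setdefault_self_self]
  exact P' x _ (hR x)

theorem pv_mem_keys_setdefault_self (d : PySem.Dict String String) (x v : String) :
    x ∈ (d.setdefault x v).keys := by
  rw [PySem.Dict.keys_setdefault]
  split_ifs with hc
  · rw [PySem.Dict.contains_eq_decide_mem_keys] at hc; simpa using hc
  · simp

theorem pv_keys_subset_setdefault (d : PySem.Dict String String) (k v : String) :
    d.keys ⊆ (d.setdefault k v).keys := by
  intro y hy
  rw [PySem.Dict.keys_setdefault]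
  split_ifs with hc
  · exact hy
  · exact List.mem_append.mpr (Or.inl hy)

theorem pvInv_union {p l : PySem.Dict String String} (h : pvInv p l) (a b : String) :
    pvInv (pvUnion p a b) (pvMergeStep l a b) := by
  obtain ⟨hCp, hCl, hnd, hR⟩ := h
  obtain ⟨C1, K1, R1, P1⟩ := pvFindTop_spec p a hCp ⟨_, hR a⟩
  obtain ⟨C2, K2, R2, P2⟩ := pvFindTop_spec (pvFindTop p a).1 b C1 ⟨_, P1 b _ (hR b)⟩
  have hra_val : (pvFindTop p a).2 = l.getD a a := pvRoot_unique R1 (hR a)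
  have hrb_val : (pvFindTop (pvFindTop p a).1 b).2 = l.getD b b :=
    pvRoot_unique R2 (P1 b _ (hR b))
  have hraB : (l.setdefault a a).getD a a = l.getD a a := pv_getD_setdefault_self_self l a a
  have hgal : ∀ x, ((l.setdefault a a).setdefault b b).getD x x = l.getD x x := by
    intro x
    rw [pv_getD_setdefault_self_self, pv_getD_setdefault_self_self]
  have hCl2 : pvClosed ((l.setdefault a a).setdefault b b) :=
    pvClosed_setdefault (pvClosed_setdefault hCl a) b
  have hnd2 : ((l.setdefault a a).setdefault b b).keys.Nodup :=
    pv_nodup_keys_setdefault (pv_nodup_keys_setdefault hnd a a) b b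
  have base : ∀ x, pvRoot (pvFindTop (pvFindTop p a).1 b).1 x (l.getD x x) :=
    fun x => P2 x _ (P1 x _ (hR x))
  simp only [pvUnion, pvMergeStep]
  rw [hra_val, hrb_val, hraB, hgal b]
  by_cases hrr : l.getD a a = l.getD b b
  · rw [if_pos (beq_iff_eq.mpr hrr), if_pos (beq_iff_eq.mpr hrr)]
    refine ⟨C2, hCl2, hnd2, ?_⟩
    intro x
    rw [hgal x]
    exact base x
  · rw [if_neg (by simpa using hrr), if_neg (by simpa using hrr)]
    -- root facts in p2
    have hga_root2 : pvIsRoot (pvFindTop (pvFindTop p a).1 b).1 (l.getD a a) := by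
      obtain ⟨_, _, hrt⟩ := R1
      rw [hra_val] at hrt
      obtain ⟨_, _, hrt2⟩ := P2 _ _ (P1 _ _ ⟨0, rfl, hrt⟩)
      exact hrt2
    have hgb_root2 : pvIsRoot (pvFindTop (pvFindTop p a).1 b).1 (l.getD b b) := by
      obtain ⟨_, _, hrt⟩ := R2
      rw [hrb_val] at hrt
      obtain ⟨_, _, hrt2⟩ := P2 _ _ ⟨0, rfl, hrt⟩
      exact hrt2
    have upd := pvRoot_insert_union hga_root2 hgb_root2 hrr
    -- memberships
    have ha_mem1 : a ∈ (pvFindTop p a).1.keys := by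
      rw [K1]; exact pv_mem_keys_setdefault_self p a a
    have hga_mem1 : l.getD a a ∈ (pvFindTop p a).1.keys := by
      have := pvRoot_mem_keys C1 (P1 a _ R1) ha_mem1
      rwa [hra_val] at this
    have hsup : (pvFindTop p a).1.keys ⊆ (pvFindTop (pvFindTop p a).1 b).1.keys := by
      intro y hy
      rw [K2]
      exact pv_keys_subset_setdefault _ b b hy
    have hga_mem2 : l.getD a a ∈ (pvFindTop (pvFindTop p a).1 b).1.keys := hsup hga_mem1
    have hb_mem2 : b ∈ (pvFindTop (pvFindTop p a).1 b).1.keys := by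
      rw [K2]; exact pv_mem_keys_setdefault_self _ b b
    have hgb_mem2 : l.getD b b ∈ (pvFindTop (pvFindTop p a).1 b).1.keys := by
      have := pvRoot_mem_keys C2 (P2 b _ R2) hb_mem2
      rwa [hrb_val] at this
    have hcont_ga : (pvFindTop (pvFindTop p a).1 b).1.contains (l.getD a a) = true := by
      rw [PySem.Dict.contains_eq_decide_mem_keys]; simp [hga_mem2]
    have hkeysins :
        ((pvFindTop (pvFindTop p a).1 b).1.insert (l.getD a a) (l.getD b b)).keys =
        (pvFindTop (pvFindTop p a).1 b).1.keys :=
      PySem.Dict.keys_insert_of_contains _ _ hcont_ga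
    -- l2-side memberships
    have hga_mem_l2 : l.getD a a ∈ ((l.setdefault a a).setdefault b b).keys := by
      have ha_l1 : a ∈ (l.setdefault a a).keys := pv_mem_keys_setdefault_self l a a
      have := pvClosed_setdefault hCl a a ha_l1
      rw [show pvSt (l.setdefault a a) a = (l.setdefault a a).getD a a from rfl, hraB] at this
      exact pv_keys_subset_setdefault _ b b this
    have hgb_mem_l2 : l.getD b b ∈ ((l.setdefault a a).setdefault b b).keys := by
      have hb_l2 : b ∈ ((l.setdefault a a).setdefault b b).keys :=
        pv_mem_keys_setdefault_self _ b b
      have := hCl2 b hb_l2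
      rwa [show pvSt ((l.setdefault a a).setdefault b b) b =
        ((l.setdefault a a).setdefault b b).getD b b from rfl, hgal b] at this
    refine ⟨?_, ?_, ?_, ?_⟩
    · -- Closed A side
      intro k hk
      rw [hkeysins] at hk ⊢
      by_cases hkga : k = l.getD a a
      · have hst : pvSt ((pvFindTop (pvFindTop p a).1 b).1.insert (l.getD a a) (l.getD b b)) k =
            l.getD b b := by
          unfold pvSt
          rw [PySem.Dict.getD_insert]
          simp [hkga]
        rw [hst]
        exact hgb_mem2
      · have hst : pvSt ((pvFindTop (pvFindTop p a).1 b).1.insert (l.getD a a) (l.getD b b)) k =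
            pvSt (pvFindTop (pvFindTop p a).1 b).1 k := by
          unfold pvSt
          rw [PySem.Dict.getD_insert]
          simp [hkga]
        rw [hst]
        exact C2 k hk
    · -- Closed B side
      intro k hk
      rw [pv_keys_relabel hnd2] at hk ⊢
      have hst : pvSt (pvRelabel ((l.setdefault a a).setdefault b b) (l.getD a a) (l.getD b b)) k =
          (pvRelabel ((l.setdefault a a).setdefault b b) (l.getD a a) (l.getD b b)).getD k k := rfl
      rw [hst, pv_getD_relabel hnd2, if_pos hk]
      split_ifs with hv
      · exact hgb_mem_l2
      · exact hCl2 k hk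
    · rw [pv_keys_relabel hnd2]
      exact hnd2
    · intro x
      rw [pv_getD_relabel hnd2]
      by_cases hxk : x ∈ ((l.setdefault a a).setdefault b b).keys
      · rw [if_pos hxk, hgal x]
        exact upd x _ (base x)
      · rw [if_neg hxk]
        have hgx : l.getD x x = x := by
          apply PySem.Dict.getD_of_not_contains
          rw [PySem.Dict.contains_eq_decide_mem_keys]
          simp only [decide_eq_false_iff_not]
          intro hxl
          exact hxk (pv_keys_subset_setdefault _ b b (pv_keys_subset_setdefault _ a a hxl))
        have hxga : x ≠ l.getD a a := by
          intro he
          exact hxk (he ▸ hga_mem_l2)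
        have := upd x _ (base x)
        rw [hgx, if_neg hxga] at this
        exact this

theorem pvInv_foldl_init (cs : List (Int × Int)) : ∀ p l, pvInv p l →
    pvInv (cs.foldl (fun p c => (pvFindTop p (pvKey c.1 c.2)).1) p)
          (cs.foldl (fun l c => l.setdefault (pvKey c.1 c.2) (pvKey c.1 c.2)) l) := by
  induction cs with
  | nil => intro p l h; simpa using h
  | cons c cs ih => intro p l h; exact ih _ _ (pvInv_init h _)

theorem pvInv_foldl_pairs (qs : List (Int × Int × Int × Int)) : ∀ p l, pvInv p l →
    pvInv (qs.foldl (fun p q => pvUnion p (pvKey q.1 q.2.1) (pvKey q.2.2.1 q.2.2.2)) p)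
          (qs.foldl (fun l q => pvMergeStep l (pvKey q.1 q.2.1) (pvKey q.2.2.1 q.2.2.2)) l) := by
  induction qs with
  | nil => intro p l h; simpa using h
  | cons q qs ih => intro p l h; exact ih _ _ (pvInv_union h _ _)

theorem pv_collect_foldl (cs : List (Int × Int)) :
    ∀ (p l : PySem.Dict String String) (g : PySem.Dict String (List (Int × Int))), pvInv p l →
    (cs.foldl (fun st c =>
        let fr := pvFindTop st.1 (pvKey c.1 c.2)
        (fr.1, st.2.modify fr.2 [] (fun ms => ms ++ [c]))) (p, g)).2 =
    cs.foldl (fun g c =>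
        g.modify (l.getD (pvKey c.1 c.2) (pvKey c.1 c.2)) [] (fun ms => ms ++ [c])) g := by
  induction cs with
  | nil => intro p l g h; rfl
  | cons c cs ih =>
    intro p l g h
    obtain ⟨hCp, hCl, hnd, hR⟩ := h
    obtain ⟨C', K', R', P'⟩ := pvFindTop_spec p (pvKey c.1 c.2) hCp ⟨_, hR _⟩
    have hr : (pvFindTop p (pvKey c.1 c.2)).2 = l.getD (pvKey c.1 c.2) (pvKey c.1 c.2) :=
      pvRoot_unique R' (hR _)
    simp only [List.foldl_cons]
    rw [ih _ _ _ ⟨C', hCl, hnd, fun x => P' x _ (hR x)⟩, hr]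

theorem pvInv_empty : pvInv PySem.Dict.empty PySem.Dict.empty := by
  refine ⟨?_, ?_, ?_, ?_⟩
  · intro k hk; simp [PySem.Dict.keys_empty] at hk
  · intro k hk; simp [PySem.Dict.keys_empty] at hk
  · simp [PySem.Dict.keys_empty]
  · intro x
    refine ⟨0, rfl, ?_⟩
    unfold pvIsRoot pvSt
    rw [PySem.Dict.getD_empty]

-- nested frame/segment loops are one loop over the flat cell list
theorem pv_foldl_cells {γ : Type} (frames : List (List (Int × Int)))
    (g : γ → (Int × Int) → γ) (init : γ) :
    (PySem.List.enumerate frames).foldl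
      (fun acc fs => ((PySem.Dict.ofList fs.2 : PySem.Dict Int Int).keys).foldl
        (fun acc sid => g acc (fs.1, sid)) acc) init =
    ((PySem.List.enumerate frames).flatMap
      (fun fs => ((PySem.Dict.ofList fs.2 : PySem.Dict Int Int).keys).map (fun sid => (fs.1, sid)))).foldl g init := by
  rw [List.foldl_flatMap]
  simp [List.foldl_map]

-- the flat cell list both nested loops traverse
def pvCells (frames : List (List (Int × Int))) : List (Int × Int) :=
  (PySem.List.enumerate frames).flatMap
    (fun fs => ((PySem.Dict.ofList fs.2 : PySem.Dict Int Int).keys).map (fun sid => (fs.1, sid)))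

theorem pv_bridgeA1 (frames : List (List (Int × Int))) :
    (PySem.List.enumerate frames).foldl
      (fun p fs => ((PySem.Dict.ofList fs.2 : PySem.Dict Int Int).keys).foldl
        (fun p sid => (pvFindTop p (pvKey fs.1 sid)).1) p)
      PySem.Dict.empty =
    (pvCells frames).foldl (fun p c => (pvFindTop p (pvKey c.1 c.2)).1) PySem.Dict.empty :=
  pv_foldl_cells frames (fun p c => (pvFindTop p (pvKey c.1 c.2)).1) PySem.Dict.empty

theorem pv_bridgeB1 (frames : List (List (Int × Int))) :
    (PySem.List.enumerate frames).foldl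
      (fun l fs => ((PySem.Dict.ofList fs.2 : PySem.Dict Int Int).keys).foldl
        (fun l sid => l.setdefault (pvKey fs.1 sid) (pvKey fs.1 sid)) l)
      PySem.Dict.empty =
    (pvCells frames).foldl (fun l c => l.setdefault (pvKey c.1 c.2) (pvKey c.1 c.2))
      PySem.Dict.empty :=
  pv_foldl_cells frames (fun l c => l.setdefault (pvKey c.1 c.2) (pvKey c.1 c.2)) PySem.Dict.empty

theorem pv_bridgeA3 (frames : List (List (Int × Int)))
    (init : PySem.Dict String String × PySem.Dict String (List (Int × Int))) :
    (PySem.List.enumerate frames).foldl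
      (fun st fs => ((PySem.Dict.ofList fs.2 : PySem.Dict Int Int).keys).foldl
        (fun (st : PySem.Dict String String × PySem.Dict String (List (Int × Int))) sid =>
          let fr := pvFindTop st.1 (pvKey fs.1 sid)
          (fr.1, st.2.modify fr.2 [] (fun ms => ms ++ [(fs.1, sid)]))) st)
      init =
    (pvCells frames).foldl
      (fun st c =>
        let fr := pvFindTop st.1 (pvKey c.1 c.2)
        (fr.1, st.2.modify fr.2 [] (fun ms => ms ++ [c]))) init :=
  pv_foldl_cells frames
    (fun st c =>
      let fr := pvFindTop st.1 (pvKey c.1 c.2)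
      (fr.1, st.2.modify fr.2 [] (fun ms => ms ++ [c]))) init

theorem pv_bridgeB3 (frames : List (List (Int × Int))) (l1 : PySem.Dict String String) :
    (PySem.List.enumerate frames).foldl
      (fun g fs => ((PySem.Dict.ofList fs.2 : PySem.Dict Int Int).keys).foldl
        (fun (g : PySem.Dict String (List (Int × Int))) sid =>
          g.modify (l1.getD (pvKey fs.1 sid) (pvKey fs.1 sid)) [] (fun ms => ms ++ [(fs.1, sid)])) g)
      PySem.Dict.empty =
    (pvCells frames).foldl
      (fun g c =>
        g.modify (l1.getD (pvKey c.1 c.2) (pvKey c.1 c.2)) [] (fun ms => ms ++ [c]))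
      PySem.Dict.empty :=
  pv_foldl_cells frames
    (fun g c =>
      g.modify (l1.getD (pvKey c.1 c.2) (pvKey c.1 c.2)) [] (fun ms => ms ++ [c]))
    PySem.Dict.empty

-- ===== VERDICT (by name: the statement is the Claim_ definition above) =====
theorem build_global_segments_greedy_spec : Claim_equal_build_global_segments_greedy := by
  intro frames pairs _
  unfold Spec_build_global_segments_greedy
  simp only [build_global_segments_greedy, build_global_segments_greedy_alt]
  rw [pv_bridgeA1, pv_bridgeB1, pv_bridgeA3, pv_bridgeB3]
  have h1 := pvInv_foldl_init (pvCells frames) _ _ pvInv_empty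
  have h2 := pvInv_foldl_pairs pairs _ _ h1
  rw [pv_collect_foldl (pvCells frames) _ _ PySem.Dict.empty h2]
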